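-- pv_equiv track=rewrite | github.com/henriquefarisco/CapyOS | tools/scripts/inspect_disk.py | pick_kernel
-- ===== SOURCE A (Python) =====
-- def pick_kernel(entries, header_lba, header_sec):
--     # Prefer NORMAL, then RECOVERY, else header values.
--     if entries:
--         for etype, elba, esec, _ in entries:
--             if etype == 1 and elba and esec:
--                 return elba, esec, "manifest:normal"
--         for etype, elba, esec, _ in entries:
--             if etype == 2 and elba and esec:
--                 return elba, esec, "manifest:recovery"
--     return header_lba, header_sec, "header/fallback"
-- ===== SOURCE B (Python) =====
-- def pick_kernel(entries, header_lba, header_sec):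
--     # Single pass: return first NORMAL immediately, remember first RECOVERY.
--     recovery = None
--     for etype, elba, esec, _ in entries:
--         if etype == 1 and elba and esec:
--             return elba, esec, "manifest:normal"
--         if recovery is None and etype == 2 and elba and esec:
--             recovery = (elba, esec)
--     if recovery is not None:
--         return recovery[0], recovery[1], "manifest:recovery"
--     return header_lba, header_sec, "header/fallback"
-- ===== Notes on version B (the rewrite author's own statement) =====
-- stated objective: alternative
-- what changed: Replaced A's two independent scans over entries with one pass that returns the first NORMAL immediately and threads the first RECOVERY through an accumulator.
import Mathlib
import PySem

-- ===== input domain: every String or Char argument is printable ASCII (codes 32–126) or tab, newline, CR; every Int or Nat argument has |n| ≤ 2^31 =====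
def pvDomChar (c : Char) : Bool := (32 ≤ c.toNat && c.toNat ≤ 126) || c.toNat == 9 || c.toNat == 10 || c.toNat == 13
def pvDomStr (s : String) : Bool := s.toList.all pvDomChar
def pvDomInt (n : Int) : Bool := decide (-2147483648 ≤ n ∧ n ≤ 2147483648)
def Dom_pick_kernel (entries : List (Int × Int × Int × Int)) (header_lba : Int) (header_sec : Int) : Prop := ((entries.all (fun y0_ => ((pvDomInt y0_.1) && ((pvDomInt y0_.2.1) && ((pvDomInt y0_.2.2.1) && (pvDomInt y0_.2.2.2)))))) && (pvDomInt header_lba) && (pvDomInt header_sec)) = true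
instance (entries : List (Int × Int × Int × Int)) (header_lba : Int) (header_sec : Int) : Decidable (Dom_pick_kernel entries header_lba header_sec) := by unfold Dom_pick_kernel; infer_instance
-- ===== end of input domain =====

-- B replaces A's two independent scans by one accumulator-threaded pass (objective: alternative decomposition).

-- ===== PORT A =====
-- first scan: first NORMAL (type 1) entry with truthy lba and sec
def pkScanNormal : List (Int × Int × Int × Int) → Option (Int × Int × String)
  | [] => none
  | (etype, elba, esec, _) :: rest =>
      if etype = 1 ∧ elba ≠ 0 ∧ esec ≠ 0 then some (elba, esec, "manifest:normal")
      else pkScanNormal rest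

-- second scan: first RECOVERY (type 2) entry with truthy lba and sec
def pkScanRecovery : List (Int × Int × Int × Int) → Option (Int × Int × String)
  | [] => none
  | (etype, elba, esec, _) :: rest =>
      if etype = 2 ∧ elba ≠ 0 ∧ esec ≠ 0 then some (elba, esec, "manifest:recovery")
      else pkScanRecovery rest

def pick_kernel (entries : List (Int × Int × Int × Int)) (header_lba : Int) (header_sec : Int) : Int × Int × String :=
  if entries ≠ [] then
    match pkScanNormal entries with
    | some r => r
    | none =>
      match pkScanRecovery entries with
      | some r => r
      | none => (header_lba, header_sec, "header/fallback")
  else (header_lba, header_sec, "header/fallback")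

-- ===== PORT B =====
-- single pass, threading the first RECOVERY candidate as an accumulator
def pkLoop : List (Int × Int × Int × Int) → Option (Int × Int) → Int → Int → Int × Int × String
  | [], recov, hl, hs =>
      match recov with
      | some (l, s) => (l, s, "manifest:recovery")
      | none => (hl, hs, "header/fallback")
  | (etype, elba, esec, _) :: rest, recov, hl, hs =>
      if etype = 1 ∧ elba ≠ 0 ∧ esec ≠ 0 then (elba, esec, "manifest:normal")
      else pkLoop rest
        (if recov = none ∧ etype = 2 ∧ elba ≠ 0 ∧ esec ≠ 0 then some (elba, esec) else recov)
        hl hs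

def pick_kernel_alt (entries : List (Int × Int × Int × Int)) (header_lba : Int) (header_sec : Int) : Int × Int × String :=
  pkLoop entries none header_lba header_sec

-- ===== PRECONDITION & SPEC =====
def Spec_pick_kernel (entries : List (Int × Int × Int × Int)) (header_lba : Int) (header_sec : Int) (out : Int × Int × String) : Prop := out = pick_kernel_alt entries header_lba header_sec
instance (entries : List (Int × Int × Int × Int)) (header_lba : Int) (header_sec : Int) (out : Int × Int × String) : Decidable (Spec_pick_kernel entries header_lba header_sec out) := by unfold Spec_pick_kernel; infer_instance

-- ===== CLAIM (what is proved, stated in full; the proofs are below) =====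
def Claim_equal_pick_kernel : Prop := ∀ (entries : List (Int × Int × Int × Int)) (header_lba : Int) (header_sec : Int), Dom_pick_kernel entries header_lba header_sec → Spec_pick_kernel entries header_lba header_sec (pick_kernel entries header_lba header_sec)

-- ===== LEMMAS AND PROOFS =====
theorem pkLoop_char (e : List (Int × Int × Int × Int)) (recov : Option (Int × Int))
    (hl hs : Int) :
    pkLoop e recov hl hs =
      match pkScanNormal e with
      | some r => r
      | none =>
        match recov with
        | some (l, s) => (l, s, "manifest:recovery")
        | none =>
          match pkScanRecovery e with
          | some r => r
          | none => (hl, hs, "header/fallback") := by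
  induction e generalizing recov with
  | nil => cases recov with
    | none => rfl
    | some p => cases p; rfl
  | cons hd tl ih =>
    obtain ⟨t, l, s, x⟩ := hd
    simp only [pkLoop, pkScanNormal, pkScanRecovery]
    by_cases hn : t = 1 ∧ l ≠ 0 ∧ s ≠ 0
    · simp [hn]
    · simp only [hn, if_false, ih]
      cases recov with
      | some p =>
        cases p
        simp
      | none =>
        by_cases hr : t = 2 ∧ l ≠ 0 ∧ s ≠ 0 <;> simp [hr]

-- ===== VERDICT (by name: the statement is the Claim_ definition above) =====
theorem pick_kernel_spec : Claim_equal_pick_kernel := by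
  intro entries hl hs _
  unfold Spec_pick_kernel pick_kernel pick_kernel_alt
  rw [pkLoop_char]
  cases entries with
  | nil => rfl
  | cons hd tl => simp
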